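-- pv_equiv track=rewrite | github.com/Cyberbeni/GitHooks | import_sort.py | parse_blocks
-- ===== SOURCE A (Python) =====
-- def parse_block(lines, header=False):
--     """Parse and return a single block, popping off the start of `lines`.
--
--     If parsing a header block, we stop after we reach a line that is not a
--     comment. Otherwise, we stop after reaching an empty line.
--
--     :param lines: list of lines
--     :param header: whether we are parsing a header block
--     :return: list of lines that form the single block
--     """
--     block_lines = []
--     importBlock=False
--     if lines and lines[0] and lines[0].startswith('#import'):
--         importBlock=True
--     while lines and lines[0] and (importBlock == lines[0].startswith('#import')):
--         block_lines.append(lines.pop(0))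
--     return block_lines
--
-- def parse_blocks(lines):
--     """Parse and return all possible blocks, popping off the start of `lines`.
--
--     :param lines: list of lines
--     :return: list of blocks, where each block is a list of lines
--     """
--     blocks = []
--
--     while lines:
--         if lines[0] == '':
--             blocks.append([lines.pop(0)])
--         else:
--             blocks.append(parse_block(lines))
--
--     return blocks
-- ===== SOURCE B (Python) =====
-- def parse_blocks(lines):
--     """Alternative: build blocks back-to-front with one fold over reversed(lines).
--
--     A line merges into the following block exactly when neither it nor the
--     block's first line is empty and both agree on startswith('#import');
--     otherwise it starts a new singleton block.  Like A, `lines` is fully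
--     consumed (emptied in place).
--     """
--     blocks = []
--     for ln in reversed(lines):
--         if blocks and ln != '':
--             nxt = blocks[0][0]
--             if nxt != '' and ln.startswith('#import') == nxt.startswith('#import'):
--                 blocks[0].insert(0, ln)
--                 continue
--         blocks.insert(0, [ln])
--     del lines[:]
--     return blocks
-- ===== Notes on version B (the rewrite author's own statement) =====
-- stated objective: alternative
-- what changed: A consumes lines front-to-back with a nested while-loop helper (parse_block) popping off the list; B builds the block list back-to-front in a single fold over reversed(lines), merging each line into the following block or starting a new singleton, then empties lines like A.
import Mathlib
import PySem

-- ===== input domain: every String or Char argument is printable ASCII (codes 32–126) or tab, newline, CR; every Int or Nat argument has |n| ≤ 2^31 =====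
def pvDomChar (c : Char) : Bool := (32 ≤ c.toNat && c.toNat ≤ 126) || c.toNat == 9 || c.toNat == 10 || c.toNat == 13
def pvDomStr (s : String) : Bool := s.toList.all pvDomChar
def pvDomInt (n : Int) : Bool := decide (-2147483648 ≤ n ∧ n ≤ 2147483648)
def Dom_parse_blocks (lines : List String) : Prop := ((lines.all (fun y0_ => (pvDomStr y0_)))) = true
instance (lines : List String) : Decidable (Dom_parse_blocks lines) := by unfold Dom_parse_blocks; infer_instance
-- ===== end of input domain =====

-- B builds the blocks back-to-front with a single fold instead of A's nested pop-loops;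
-- both Pythons fully consume `lines` in place (equivalence here is about the return value,
-- and B performs the same mutation).

-- ===== PORT A =====
-- the `while lines and lines[0] and (importBlock == lines[0].startswith('#import'))` loop of
-- parse_block: returns (block_lines, remaining lines)
def pbGo (importBlock : Bool) : List String → List String × List String
  | [] => ([], [])
  | l :: rest =>
    if decide (l ≠ "") && (importBlock == PySem.Str.startswith l "#import") then
      let p := pbGo importBlock rest
      (l :: p.1, p.2)
    else ([], l :: rest)

def parse_block (lines : List String) : List String × List String :=
  let importBlock :=
    match lines with
    | [] => false
    | l :: _ => decide (l ≠ "") && PySem.Str.startswith l "#import"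
  pbGo importBlock lines

theorem pbGo_len (b : Bool) (ls : List String) : (pbGo b ls).2.length ≤ ls.length := by
  induction ls with
  | nil => simp [pbGo]
  | cons l rest ih =>
    simp only [pbGo]
    split
    · simpa using Nat.le_succ_of_le ih
    · simp

theorem parse_block_len (l : String) (rest : List String) (h : l ≠ "") :
    (parse_block (l :: rest)).2.length < (l :: rest).length := by
  simp only [parse_block, pbGo, h, decide_true, Bool.true_and, ne_eq, not_false_iff,
    beq_self_eq_true, if_true]
  exact Nat.lt_succ_of_le (pbGo_len _ rest)

def parse_blocks (lines : List String) : List (List String) :=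
  match lines with
  | [] => []
  | l :: rest =>
    if h : l = "" then [l] :: parse_blocks rest
    else
      let p := parse_block (l :: rest)
      p.1 :: parse_blocks p.2
termination_by lines.length
decreasing_by
  · simp
  · exact parse_block_len l rest h

-- ===== PORT B =====
-- one step of B's fold over reversed(lines): start a new singleton block, or merge `ln`
-- into the first (following) block
def altStep (ln : String) (blocks : List (List String)) : List (List String) :=
  match blocks with
  | (nxt :: blk) :: rest =>
    if ln ≠ "" ∧ nxt ≠ "" ∧ PySem.Str.startswith ln "#import" = PySem.Str.startswith nxt "#import" then
      (ln :: nxt :: blk) :: rest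
    else [ln] :: (nxt :: blk) :: rest
  | _ => [ln] :: blocks

def parse_blocks_alt (lines : List String) : List (List String) :=
  lines.foldr altStep []

-- ===== PRECONDITION & SPEC =====
def Spec_parse_blocks (lines : List String) (out : List (List String)) : Prop := out = parse_blocks_alt lines
instance (lines : List String) (out : List (List String)) : Decidable (Spec_parse_blocks lines out) := by unfold Spec_parse_blocks; infer_instance

-- ===== CLAIM (what is proved, stated in full; the proofs are below) =====
def Claim_equal_parse_blocks : Prop := ∀ (lines : List String), Dom_parse_blocks lines → Spec_parse_blocks lines (parse_blocks lines)

-- ===== LEMMAS AND PROOFS =====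

-- one-step equations for A's inner while loop
theorem pbGo_cont (r : String) (ib : Bool) (rs' : List String) (hr1 : r ≠ "")
    (hr2 : PySem.Str.startswith r "#import" = ib) :
    pbGo ib (r :: rs') = (r :: (pbGo ib rs').1, (pbGo ib rs').2) := by
  simp only [PySem.Str.startswith_eq] at hr2
  rw [pbGo, if_pos (by simp [hr1, ← hr2])]

theorem pbGo_stop (r : String) (ib : Bool) (rs' : List String)
    (hr : r = "" ∨ ¬ ib = PySem.Str.startswith r "#import") :
    pbGo ib (r :: rs') = ([], r :: rs') := by
  rw [pbGo, if_neg]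
  rcases hr with hr | hr
  · simp [hr]
  · simp only [PySem.Str.startswith_eq,
      show ("#import".toList) = ['#','i','m','p','o','r','t'] from rfl] at hr
    simp [hr]

-- B's fold on "" :: rest always starts a fresh singleton block
theorem altStep_empty (b : List (List String)) : altStep "" b = [""] :: b := by
  match b with
  | [] => rfl
  | [] :: r => rfl
  | (n :: bl) :: r => simp [altStep]

-- the first block produced by B's fold on a nonempty list begins with the first line
theorem alt_head (x : String) (xs : List String) :
    ∃ t r, parse_blocks_alt (x :: xs) = (x :: t) :: r := by
  simp only [parse_blocks_alt, List.foldr_cons]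
  generalize (xs.foldr altStep []) = b
  match b with
  | [] => exact ⟨[], [], rfl⟩
  | [] :: r => exact ⟨[], [] :: r, rfl⟩
  | (n :: bl) :: r =>
    simp only [altStep]
    split
    · exact ⟨n :: bl, r, rfl⟩
    · exact ⟨[], (n :: bl) :: r, rfl⟩

-- B's fold mirrors A's parse_block: when the head is nonempty, the fold's first block is
-- exactly parse_block's block and the rest is the fold of parse_block's remainder
theorem alt_parse_block (l : String) (rest : List String) (hl : l ≠ "") :
    parse_blocks_alt (l :: rest) =
      (parse_block (l :: rest)).1 :: parse_blocks_alt (parse_block (l :: rest)).2 := by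
  have key : ∀ (rs : List String) (x : String), x ≠ "" →
      ∀ ib, ib = PySem.Str.startswith x "#import" →
      parse_blocks_alt (x :: rs) =
        (pbGo ib (x :: rs)).1 :: parse_blocks_alt (pbGo ib (x :: rs)).2 := by
    intro rs
    induction rs with
    | nil =>
      intro x hx ib hib
      rw [pbGo_cont x ib [] hx hib.symm]
      simp [parse_blocks_alt, altStep, pbGo]
    | cons r rs' ih =>
      intro x hx ib hib
      by_cases hr : r = "" ∨ PySem.Str.startswith r "#import" ≠ PySem.Str.startswith x "#import"
      · -- the block stops after x
        rw [pbGo_cont x ib (r :: rs') hx hib.symm,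
          pbGo_stop r ib rs' (by
            rcases hr with hr | hr
            · exact Or.inl hr
            · exact Or.inr (by rw [hib]; exact fun h => hr h.symm))]
        obtain ⟨t, rr, hs⟩ := alt_head r rs'
        show altStep x (parse_blocks_alt (r :: rs')) = _
        rw [hs]
        simp only [altStep]
        rw [if_neg]
        rintro ⟨_, hr1, h2⟩
        rcases hr with hr | hr
        · exact hr1 hr
        · exact hr h2.symm
      · -- the block continues with r
        obtain ⟨hr1, hr2'⟩ := not_or.mp hr
        have hr2 := not_not.mp hr2'
        rw [pbGo_cont x ib (r :: rs') hx hib.symm,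
          pbGo_cont r ib rs' hr1 (by rw [hr2, hib])]
        have ihr := ih r hr1 ib (by rw [hib, hr2])
        rw [pbGo_cont r ib rs' hr1 (by rw [hr2, hib])] at ihr
        show altStep x (parse_blocks_alt (r :: rs')) = _
        rw [ihr]
        simp only [altStep]
        rw [if_pos ⟨hx, hr1, hr2.symm⟩]
  have h2 := key rest l hl (decide (l ≠ "") && PySem.Str.startswith l "#import") (by simp [hl])
  simpa [parse_block] using h2

theorem parse_blocks_eq_alt (lines : List String) : parse_blocks lines = parse_blocks_alt lines := by
  induction hn : lines.length using Nat.strong_induction_on generalizing lines with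
  | _ n ih =>
    match lines with
    | [] => simp [parse_blocks, parse_blocks_alt]
    | l :: rest =>
      rw [parse_blocks]
      by_cases hl : l = ""
      · subst hl
        rw [dif_pos rfl, ih rest.length (by simp [← hn]) rest rfl]
        show _ = parse_blocks_alt ("" :: rest)
        rw [show parse_blocks_alt ("" :: rest) = altStep "" (parse_blocks_alt rest) from rfl,
          altStep_empty]
      · rw [dif_neg hl]
        have hlen := parse_block_len l rest hl
        show (parse_block (l :: rest)).1 :: parse_blocks (parse_block (l :: rest)).2 = _
        rw [ih (parse_block (l :: rest)).2.length (by omega) _ rfl]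
        exact (alt_parse_block l rest hl).symm

-- ===== VERDICT (by name: the statement is the Claim_ definition above) =====
theorem parse_blocks_spec : Claim_equal_parse_blocks := by
  intro lines _
  show parse_blocks lines = parse_blocks_alt lines
  exact parse_blocks_eq_alt lines
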